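-- pv_equiv track=rewrite | github.com/ONMARTECH/quanta-sdk | quanta/runner.py | _filter_measured_qubits
-- ===== SOURCE A (Python) =====
-- def _filter_measured_qubits(
--     counts: dict[str, int],
--     measured_qubits: tuple[int, ...],
--     num_qubits: int,
-- ) -> dict[str, int]:
--     """Returns results for only the measured qubits.
--
--     Args:
--         counts: Full measurement results.
--         measured_qubits: Measured qubit indices.
--         num_qubits: Total qubit count.
--
--     Returns:
--         Filtered counts dict.
--     """
--     filtered: dict[str, int] = {}
--
--     for bitstring, count in counts.items():
--         # Extract only the bits of measured qubits
--         measured_bits = "".join(bitstring[q] for q in measured_qubits)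
--         filtered[measured_bits] = filtered.get(measured_bits, 0) + count
--
--     return filtered
-- ===== SOURCE B (Python) =====
-- def _filter_measured_qubits(
--     counts: dict[str, int],
--     measured_qubits: tuple[int, ...],
--     num_qubits: int,
-- ) -> dict[str, int]:
--     """Returns results for only the measured qubits."""
--     keyed = [
--         ("".join(bitstring[q] for q in measured_qubits), count)
--         for bitstring, count in counts.items()
--     ]
--     return {
--         key: sum(c for k, c in keyed if k == key)
--         for key in dict.fromkeys(k for k, _ in keyed)
--     }
-- ===== Notes on version B (the rewrite author's own statement) =====
-- stated objective: alternative
-- what changed: Replaced the running dict accumulation (get-then-insert per entry) with a declarative group-by: project every entry to (key, count) once, take the distinct keys via dict.fromkeys, and build the result in one dict comprehension that sums each key's counts.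
import Mathlib
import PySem

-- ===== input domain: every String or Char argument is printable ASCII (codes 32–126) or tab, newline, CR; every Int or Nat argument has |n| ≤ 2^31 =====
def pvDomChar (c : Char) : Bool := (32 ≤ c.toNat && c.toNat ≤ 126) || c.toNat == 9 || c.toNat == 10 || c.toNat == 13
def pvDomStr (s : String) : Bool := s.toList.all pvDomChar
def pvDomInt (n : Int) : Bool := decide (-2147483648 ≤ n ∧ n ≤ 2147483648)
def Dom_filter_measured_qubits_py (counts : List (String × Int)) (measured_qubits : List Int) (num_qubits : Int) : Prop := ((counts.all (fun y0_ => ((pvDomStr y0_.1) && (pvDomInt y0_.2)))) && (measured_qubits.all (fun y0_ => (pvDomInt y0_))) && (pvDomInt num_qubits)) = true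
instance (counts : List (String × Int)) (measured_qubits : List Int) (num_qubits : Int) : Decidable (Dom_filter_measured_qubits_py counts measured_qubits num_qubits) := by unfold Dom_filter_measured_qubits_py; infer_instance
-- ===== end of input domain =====

-- B replaces A's running dict accumulation by a declarative group-by (project once, distinct
-- keys via dict.fromkeys, one sum per key); same output, objective: alternative decomposition.

-- ===== PORT A =====
-- "".join(bitstring[q] for q in measured_qubits); Pre_ guarantees every pyGet? is some,
-- so filterMap loses nothing on admitted inputs (shared by both Pythons verbatim).
def projKey (bitstring : String) (measured_qubits : List Int) : String :=
  String.ofList (measured_qubits.filterMap (fun q => PySem.Str.pyGet? bitstring q))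

def filter_measured_qubits_py (counts : List (String × Int)) (measured_qubits : List Int) (num_qubits : Int) : List (String × Int) :=
  (counts.foldl
    (fun (filtered : PySem.Dict String Int) p =>
      let measured_bits := projKey p.1 measured_qubits
      filtered.insert measured_bits (filtered.getD measured_bits 0 + p.2))
    PySem.Dict.empty).items

-- ===== PORT B =====
-- keyed = [(key, count) ...]; then {key: sum(...) for key in dict.fromkeys(keys)}
-- (dict.fromkeys over keys = PySem.List.dedup: first occurrences, in order)
def filter_measured_qubits_py_alt (counts : List (String × Int)) (measured_qubits : List Int) (num_qubits : Int) : List (String × Int) :=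
  let keyed := counts.map (fun p => (projKey p.1 measured_qubits, p.2))
  (PySem.List.dedup (keyed.map (·.1))).map
    (fun key => (key, (keyed.filter (fun q => q.1 == key)).foldl (fun a q => a + q.2) 0))

-- ===== PRECONDITION & SPEC =====
-- Pre_ excludes exactly the inputs where Python A raises IndexError: some measured-qubit
-- index out of range (Python-style, negative allowed) for some bitstring in counts.
def Pre_filter_measured_qubits_py (counts : List (String × Int)) (measured_qubits : List Int) (num_qubits : Int) : Prop :=
  ∀ p ∈ counts, ∀ q ∈ measured_qubits, PySem.Raise.InRange p.1.toList.length q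

instance (counts : List (String × Int)) (measured_qubits : List Int) (num_qubits : Int) : Decidable (Pre_filter_measured_qubits_py counts measured_qubits num_qubits) := by unfold Pre_filter_measured_qubits_py; infer_instance

def pvWitness_filter_measured_qubits_py : (List (String × Int)) × List Int × Int :=
  ([("01", 3), ("10", 2), ("11", 1)], [0, -1], 2)

def Spec_filter_measured_qubits_py (counts : List (String × Int)) (measured_qubits : List Int) (num_qubits : Int) (out : List (String × Int)) : Prop := out = filter_measured_qubits_py_alt counts measured_qubits num_qubits
instance (counts : List (String × Int)) (measured_qubits : List Int) (num_qubits : Int) (out : List (String × Int)) : Decidable (Spec_filter_measured_qubits_py counts measured_qubits num_qubits out) := by unfold Spec_filter_measured_qubits_py; infer_instance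

-- ===== CLAIM =====
def Claim_equal_filter_measured_qubits_py : Prop := ∀ (counts : List (String × Int)) (measured_qubits : List Int) (num_qubits : Int), Dom_filter_measured_qubits_py counts measured_qubits num_qubits → Pre_filter_measured_qubits_py counts measured_qubits num_qubits → Spec_filter_measured_qubits_py counts measured_qubits num_qubits (filter_measured_qubits_py counts measured_qubits num_qubits)

-- ===== LEMMAS AND PROOFS =====

-- total count carried by key k in ps
def sKey (k : String) (ps : List (String × Int)) : Int :=
  ((ps.filter (fun q => q.1 == k)).map (·.2)).sum

theorem foldl_add_snd (l : List (String × Int)) (a : Int) :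
    l.foldl (fun a q => a + q.2) a = a + (l.map (·.2)).sum := by
  induction l generalizing a with
  | nil => simp
  | cons x xs ih => simp [List.foldl_cons, ih, add_assoc]

-- the accumulated dict's lookup at k is the sum of k's counts
theorem getD_foldl_insert_add (l : List (String × Int)) (d : PySem.Dict String Int) (k : String) :
    (l.foldl (fun d p => d.insert p.1 (d.getD p.1 0 + p.2)) d).getD k 0
      = d.getD k 0 + sKey k l := by
  induction l generalizing d with
  | nil => simp [sKey]
  | cons p ps ih =>
    simp only [List.foldl_cons, ih, PySem.Dict.getD_insert]
    by_cases h : k = p.1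
    · simp [sKey, h, add_assoc]
    · have hb : (p.1 == k) = false := by simpa using fun e => h e.symm
      simp [sKey, hb, h]

-- generalized A-side foldl over projected pairs
theorem foldl_proj (mq : List Int) (counts : List (String × Int)) (d : PySem.Dict String Int) :
    counts.foldl
        (fun (d : PySem.Dict String Int) p =>
          d.insert (projKey p.1 mq) (d.getD (projKey p.1 mq) 0 + p.2)) d
      = (counts.map (fun p => (projKey p.1 mq, p.2))).foldl
          (fun d p => d.insert p.1 (d.getD p.1 0 + p.2)) d := by
  induction counts generalizing d with
  | nil => rfl
  | cons p ps ih => simp [List.foldl_cons, List.map_cons, ih]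

-- ===== VERDICT =====
theorem filter_measured_qubits_py_spec : Claim_equal_filter_measured_qubits_py := by
  intro counts measured_qubits num_qubits _ _
  show (counts.foldl
      (fun (filtered : PySem.Dict String Int) p =>
        filtered.insert (projKey p.1 measured_qubits)
          (filtered.getD (projKey p.1 measured_qubits) 0 + p.2))
      PySem.Dict.empty).items
    = filter_measured_qubits_py_alt counts measured_qubits num_qubits
  unfold filter_measured_qubits_py_alt
  rw [foldl_proj]
  set keyed := counts.map (fun p => (projKey p.1 measured_qubits, p.2)) with hkeyed
  set R := keyed.foldl (fun d p => d.insert p.1 (d.getD p.1 0 + p.2)) PySem.Dict.empty with hR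
  have hnd : R.keys.Nodup := by
    rw [hR]
    exact PySem.Dict.nodup_keys_foldl_insert_key keyed Prod.fst
      (fun d x => d.getD x.1 0 + x.2) PySem.Dict.empty PySem.Dict.nodup_keys_empty
  have hkeys : R.keys = PySem.List.dedup (keyed.map (·.1)) := by
    rw [hR, PySem.Dict.keys_foldl_insert_key keyed Prod.fst]
    simp [PySem.Dict.keys, PySem.Dict.empty, PySem.Set.update_nil_left]
  rw [PySem.Dict.items_eq_map_keys R hnd 0, hkeys]
  apply List.map_congr_left
  intro k _
  have : R.getD k 0 = sKey k keyed := by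
    rw [hR, getD_foldl_insert_add]
    simp
  rw [this, foldl_add_snd]
  simp [sKey]
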